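-- pv_equiv track=rewrite | github.com/amirhosseinmhd/EBM | data/listops_generator.py | tokenize_sequence
-- ===== SOURCE A (Python) =====
-- def tokenize_sequence(seq_str, vocab, max_len):
--     """
--     Convert string sequence to token IDs.
--
--     Args:
--         seq_str: String representation of the sequence
--         vocab: Vocabulary dictionary
--         max_len: Maximum sequence length
--
--     Returns:
--         List of token IDs (padded or truncated to max_len)
--     """
--     tokens = seq_str.split()
--     token_ids = [vocab.get(t, vocab['[PAD]']) for t in tokens]
--
--     # Pad or truncate
--     if len(token_ids) < max_len:
--         token_ids += [vocab['[PAD]']] * (max_len - len(token_ids))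
--     else:
--         token_ids = token_ids[:max_len]
--
--     return token_ids
-- ===== SOURCE B (Python) =====
-- def tokenize_sequence(seq_str, vocab, max_len):
--     """Single bounded index comprehension: fuses lookup, padding and truncation."""
--     tokens = seq_str.split()
--     pad = vocab['[PAD]']
--     n = len(tokens)
--     return [vocab.get(tokens[i], pad) if i < n else pad for i in range(max_len)]
-- ===== Notes on version B (the rewrite author's own statement) =====
-- stated objective: simpler
-- what changed: Replaces map-then-pad-or-slice with a single bounded comprehension over range(max_len) that picks the token id when the index is in range and the pad id otherwise.
-- intended difference: For negative max_len with more than -max_len tokens, A returns the token ids with the last -max_len entries dropped (Python's negative slice bound), while B returns the empty list, the intended result for a maximum length of at most zero. — e.g. on tokenize_sequence("x y", [("[PAD]", 0), ("x", 1), ("y", 2)], -1): A returns [1], B returns []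
-- outside the precondition, e.g. on tokenize_sequence('', {}, 0): A returns [], B raises KeyError
import Mathlib
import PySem

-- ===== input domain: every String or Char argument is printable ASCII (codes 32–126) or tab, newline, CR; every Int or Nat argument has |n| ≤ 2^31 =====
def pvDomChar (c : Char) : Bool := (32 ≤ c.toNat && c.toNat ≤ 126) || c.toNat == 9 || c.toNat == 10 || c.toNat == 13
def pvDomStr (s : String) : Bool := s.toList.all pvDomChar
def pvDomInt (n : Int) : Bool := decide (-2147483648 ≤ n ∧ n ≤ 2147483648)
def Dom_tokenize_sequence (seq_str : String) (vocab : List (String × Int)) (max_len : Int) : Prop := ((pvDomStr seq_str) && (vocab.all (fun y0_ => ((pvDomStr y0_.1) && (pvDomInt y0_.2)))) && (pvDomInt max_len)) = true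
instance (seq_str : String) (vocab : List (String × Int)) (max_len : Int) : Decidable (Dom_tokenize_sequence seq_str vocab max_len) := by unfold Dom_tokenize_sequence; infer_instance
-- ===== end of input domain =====

-- B fuses A's map-then-pad-or-slice into one bounded index comprehension over range(max_len) (objective: simpler).


-- ===== PORT A =====
-- vocab.get(t, d) / vocab[k]: first-match association-list lookup (Pre_ guarantees '[PAD]' is present,
-- so the .getD 0 default on the '[PAD]' lookup is never taken inside Pre_).
def tokenize_sequence (seq_str : String) (vocab : List (String × Int)) (max_len : Int) : List Int :=
  let tokens := PySem.Str.split₀ seq_str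
  let pad := (vocab.lookup "[PAD]").getD 0
  let token_ids := tokens.map (fun t => (vocab.lookup t).getD pad)
  if (token_ids.length : Int) < max_len then
    token_ids ++ List.replicate (max_len - (token_ids.length : Int)).toNat pad
  else
    PySem.List.slice token_ids none (some max_len)

-- ===== PORT B =====
def tokenize_sequence_alt (seq_str : String) (vocab : List (String × Int)) (max_len : Int) : List Int :=
  let tokens := PySem.Str.split₀ seq_str
  let pad := (vocab.lookup "[PAD]").getD 0
  let n : Int := tokens.length
  (PySem.List.pyRange 0 max_len 1).map (fun i =>
    if i < n then
      -- tokens[i]; the index is in range whenever this branch is taken, so none is unreachable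
      match PySem.List.pyGet? tokens i with
      | some t => (vocab.lookup t).getD pad
      | none => pad
    else pad)

-- ===== PRECONDITION & SPEC =====
-- Pre_ requires the '[PAD]' key to be present: without it A raises KeyError whenever the string has a
-- token or max_len is positive, and on the remaining whitespace-only, max_len ≤ 0 inputs A returns []
-- while B (which evaluates the pad id eagerly) raises KeyError.
def Pre_tokenize_sequence (seq_str : String) (vocab : List (String × Int)) (max_len : Int) : Prop :=
  "[PAD]" ∈ vocab.map Prod.fst
instance (seq_str : String) (vocab : List (String × Int)) (max_len : Int) : Decidable (Pre_tokenize_sequence seq_str vocab max_len) := by unfold Pre_tokenize_sequence; infer_instance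
def pvWitness_tokenize_sequence : String × (List (String × Int)) × Int := ("A B", [("[PAD]", 0), ("A", 5)], 3)

-- For negative max_len with more than -max_len tokens, A returns the token ids with the last -max_len
-- entries dropped (Python's negative slice bound), while B returns the empty list, the intended result
-- for a maximum length of at most zero.
def D_tokenize_sequence (seq_str : String) (vocab : List (String × Int)) (max_len : Int) : Prop :=
  max_len < 0 ∧ -max_len < ((PySem.Str.split₀ seq_str).length : Int)
instance (seq_str : String) (vocab : List (String × Int)) (max_len : Int) : Decidable (D_tokenize_sequence seq_str vocab max_len) := by unfold D_tokenize_sequence; infer_instance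

def Spec_tokenize_sequence (seq_str : String) (vocab : List (String × Int)) (max_len : Int) (out : List Int) : Prop := ¬ D_tokenize_sequence seq_str vocab max_len → out = tokenize_sequence_alt seq_str vocab max_len
instance (seq_str : String) (vocab : List (String × Int)) (max_len : Int) (out : List Int) : Decidable (Spec_tokenize_sequence seq_str vocab max_len out) := by unfold Spec_tokenize_sequence; infer_instance

def pvDiffWitness_tokenize_sequence : String × (List (String × Int)) × Int := ("x y", [("[PAD]", 0), ("x", 1), ("y", 2)], -1)
def pvDiffWitnessOut_tokenize_sequence : (List Int) × (List Int) := ([1], [])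

-- ===== CLAIM (what is proved, stated in full; the proofs are below) =====
def Claim_unchanged_tokenize_sequence : Prop := ∀ (seq_str : String) (vocab : List (String × Int)) (max_len : Int), Dom_tokenize_sequence seq_str vocab max_len → Pre_tokenize_sequence seq_str vocab max_len → Spec_tokenize_sequence seq_str vocab max_len (tokenize_sequence seq_str vocab max_len)
def Claim_changed_tokenize_sequence : Prop := Dom_tokenize_sequence (pvDiffWitness_tokenize_sequence.1) (pvDiffWitness_tokenize_sequence.2.1) (pvDiffWitness_tokenize_sequence.2.2) ∧ Pre_tokenize_sequence (pvDiffWitness_tokenize_sequence.1) (pvDiffWitness_tokenize_sequence.2.1) (pvDiffWitness_tokenize_sequence.2.2) ∧ D_tokenize_sequence (pvDiffWitness_tokenize_sequence.1) (pvDiffWitness_tokenize_sequence.2.1) (pvDiffWitness_tokenize_sequence.2.2) ∧ tokenize_sequence (pvDiffWitness_tokenize_sequence.1) (pvDiffWitness_tokenize_sequence.2.1) (pvDiffWitness_tokenize_sequence.2.2) = pvDiffWitnessOut_tokenize_sequence.1 ∧ tokenize_sequence_alt (pvDiffWitness_tokenize_sequence.1) (pvDiffWitness_tokenize_sequence.2.1)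 (pvDiffWitness_tokenize_sequence.2.2) = pvDiffWitnessOut_tokenize_sequence.2 ∧ pvDiffWitnessOut_tokenize_sequence.1 ≠ pvDiffWitnessOut_tokenize_sequence.2
def Claim_exact_tokenize_sequence : Prop := ∀ (seq_str : String) (vocab : List (String × Int)) (max_len : Int), Dom_tokenize_sequence seq_str vocab max_len → Pre_tokenize_sequence seq_str vocab max_len → D_tokenize_sequence seq_str vocab max_len → tokenize_sequence seq_str vocab max_len ≠ tokenize_sequence_alt seq_str vocab max_len

-- ===== LEMMAS AND PROOFS =====

theorem pv_key (tokens : List String) (f : String → Int) (pad : Int) (m : Nat) :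
    (List.range m).map (fun k : Nat => if (k : Int) < (tokens.length : Int) then f (tokens.getD k "") else pad)
      = ((tokens.map f).take m) ++ List.replicate (m - tokens.length) pad := by
  induction m with
  | zero => simp
  | succ m ih =>
    rw [List.range_succ, List.map_append, ih]
    by_cases h : m < tokens.length
    · have h1 : (m : Int) < (tokens.length : Int) := by exact_mod_cast h
      have h2 : m - tokens.length = 0 := by omega
      have h3 : m + 1 - tokens.length = 0 := by omega
      have h4 : m < (tokens.map f).length := by simpa using h
      rw [h2, h3]
      simp only [List.replicate_zero, List.append_nil, List.map_cons, List.map_nil, if_pos h1]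
      rw [List.take_add_one, List.getElem?_eq_getElem h4]
      simp [List.getElem?_eq_getElem h]
    · have h1 : ¬ ((m : Int) < (tokens.length : Int)) := by omega
      have h2 : m + 1 - tokens.length = (m - tokens.length) + 1 := by omega
      have h3 : (tokens.map f).take m = (tokens.map f).take (m + 1) := by
        rw [List.take_of_length_le (by simp; omega), List.take_of_length_le (by simp; omega)]
      rw [List.map_singleton, if_neg h1, h3, h2, List.replicate_succ']
      simp

-- B in closed form: take-then-pad, for nonnegative max_len written as a Nat cast.
theorem pv_alt_eq (seq_str : String) (vocab : List (String × Int)) (m : Nat) :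
    tokenize_sequence_alt seq_str vocab (m : Int)
      = (((PySem.Str.split₀ seq_str).map (fun t => (vocab.lookup t).getD ((vocab.lookup "[PAD]").getD 0))).take m)
        ++ List.replicate (m - (PySem.Str.split₀ seq_str).length) ((vocab.lookup "[PAD]").getD 0) := by
  simp only [tokenize_sequence_alt]
  set tokens := PySem.Str.split₀ seq_str with htok
  set pad := (vocab.lookup "[PAD]").getD 0 with hpad
  rw [show PySem.List.pyRange 0 (m : Int) 1 = (List.range m).map (fun k : Nat => (k : Int)) by
        rw [PySem.List.pyRange_one, show ((m : Int) - 0).toNat = m by omega]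
        exact List.map_congr_left (fun k _ => by omega)]
  rw [List.map_map]
  refine (List.map_congr_left ?_).trans (pv_key tokens (fun t => (vocab.lookup t).getD pad) pad m)
  intro k hk
  simp only [Function.comp_apply]
  by_cases h : (k : Int) < (tokens.length : Int)
  · have hklt : k < tokens.length := by exact_mod_cast h
    rw [if_pos h, if_pos h]
    rw [show PySem.List.pyGet? tokens (k : Int) = some tokens[k] by
          simp [PySem.List.pyGet?_natCast, List.getElem?_eq_getElem hklt]]
    rw [List.getD_eq_getElem _ _ hklt]
  · rw [if_neg h, if_neg h]

theorem pv_alt_neg (seq_str : String) (vocab : List (String × Int)) (max_len : Int)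
    (h : max_len ≤ 0) : tokenize_sequence_alt seq_str vocab max_len = [] := by
  simp only [tokenize_sequence_alt]
  rw [PySem.List.pyRange_one_eq_nil (by omega)]
  simp

-- ===== VERDICT (by name: the statement is the Claim_ definition above) =====
theorem tokenize_sequence_spec : Claim_unchanged_tokenize_sequence := by
  intro seq_str vocab max_len _ _ hnd
  by_cases hpos : 0 ≤ max_len
  · -- nonnegative max_len: both are take-then-pad
    obtain ⟨m, rfl⟩ : ∃ m : Nat, max_len = (m : Int) := ⟨max_len.toNat, by omega⟩
    rw [pv_alt_eq]
    simp only [tokenize_sequence, List.length_map]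
    by_cases hlt : ((PySem.Str.split₀ seq_str).length : Int) < (m : Int)
    · rw [if_pos hlt, List.take_of_length_le (by simp; omega),
          show ((m : Int) - ((PySem.Str.split₀ seq_str).length : Int)).toNat
              = m - (PySem.Str.split₀ seq_str).length by omega]
    · rw [if_neg hlt, PySem.List.slice_to_natCast,
          show m - (PySem.Str.split₀ seq_str).length = 0 by omega]
      simp
  · -- negative max_len: outside D_ there are at most -max_len tokens, both sides are []
    have hpos' : max_len < 0 := by omega
    unfold D_tokenize_sequence at hnd
    have hle : ((PySem.Str.split₀ seq_str).length : Int) ≤ -max_len := by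
      by_contra hc; exact hnd ⟨hpos', by omega⟩
    rw [pv_alt_neg _ _ _ (le_of_lt hpos')]
    simp only [tokenize_sequence]
    rw [if_neg (by simp only [List.length_map]; omega)]
    obtain ⟨k, hk, rfl⟩ : ∃ k : Nat, 0 < k ∧ max_len = -(k : Int) :=
      ⟨(-max_len).toNat, by omega, by omega⟩
    rw [PySem.List.slice_to_neg_natCast _ _ hk,
        show (((PySem.Str.split₀ seq_str).map
          (fun t => (vocab.lookup t).getD ((vocab.lookup "[PAD]").getD 0))).length) - k = 0 by
          simp only [List.length_map]; omega]
    simp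

theorem tokenize_sequence_changed : Claim_changed_tokenize_sequence := by
  unfold Claim_changed_tokenize_sequence; decide

theorem tokenize_sequence_tight : Claim_exact_tokenize_sequence := by
  intro seq_str vocab max_len _ _ hd
  unfold D_tokenize_sequence at hd
  obtain ⟨hneg, hlen⟩ := hd
  rw [pv_alt_neg _ _ _ (le_of_lt hneg)]
  simp only [tokenize_sequence]
  rw [if_neg (by simp only [List.length_map]; omega)]
  obtain ⟨k, hk, rfl⟩ : ∃ k : Nat, 0 < k ∧ max_len = -(k : Int) :=
    ⟨(-max_len).toNat, by omega, by omega⟩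
  rw [PySem.List.slice_to_neg_natCast _ _ hk]
  intro hcontra
  have := congrArg List.length hcontra
  simp only [List.length_take, List.length_map, List.length_nil] at this
  omega
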